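-- pv_equiv track=rewrite | github.com/aLexzzz430/Cognitive-OS | core/orchestration/structured_answer.py | _find_uniform_separator_column
-- ===== SOURCE A (Python) =====
-- from typing import Any, Callable, Dict, List, Optional, Sequence, Set, Tuple
--
-- Grid = List[List[int]]
--
-- def _find_uniform_separator_column(grid: Grid) -> Optional[Tuple[int, int]]:
--     if not grid or not grid[0]:
--         return None
--     cols = len(grid[0])
--     for col_idx in range(cols):
--         column_values = {row[col_idx] for row in grid}
--         if len(column_values) != 1:
--             continue
--         value = next(iter(column_values))
--         if value != 0:
--             return col_idx, int(value)
--     return None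
-- ===== SOURCE B (Python) =====
-- from typing import List, Optional, Tuple
--
-- Grid = List[List[int]]
--
-- def _find_uniform_separator_column(grid: Grid) -> Optional[Tuple[int, int]]:
--     # one pass over the rows, maintaining a per-column "still uniform" mask
--     if not grid or not grid[0]:
--         return None
--     candidate = list(grid[0])
--     cols = len(candidate)
--     alive = [True] * cols
--     for row in grid[1:]:
--         for c in range(cols):
--             if row[c] != candidate[c]:
--                 alive[c] = False
--     for c in range(cols):
--         if alive[c] and candidate[c] != 0:
--             return c, int(candidate[c])
--     return None
-- ===== Notes on version B (the rewrite author's own statement) =====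
-- stated objective: alternative
-- what changed: Replaces A's per-column construction of a Python set over all rows with a single row-major pass that keeps the first row as candidate values and a boolean still-uniform mask per column, followed by a left-to-right scan of the mask.
-- outside the precondition, e.g. on _find_uniform_separator_column([[1, 2], [1]]): A returns (0, 1), B raises IndexError
import Mathlib
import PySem

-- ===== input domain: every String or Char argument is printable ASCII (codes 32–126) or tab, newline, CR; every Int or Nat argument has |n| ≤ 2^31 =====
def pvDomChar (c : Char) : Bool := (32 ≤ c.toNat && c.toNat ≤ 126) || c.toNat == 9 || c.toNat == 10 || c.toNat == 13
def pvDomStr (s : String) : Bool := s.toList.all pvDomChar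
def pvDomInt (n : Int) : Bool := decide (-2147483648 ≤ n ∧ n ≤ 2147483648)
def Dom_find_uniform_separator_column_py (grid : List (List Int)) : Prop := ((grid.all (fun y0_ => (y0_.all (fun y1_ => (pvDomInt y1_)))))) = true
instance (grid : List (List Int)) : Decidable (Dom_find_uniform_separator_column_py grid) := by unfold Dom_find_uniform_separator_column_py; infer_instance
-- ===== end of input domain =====

-- B replaces A's per-column set construction with one row-major pass keeping a per-column
-- still-uniform mask (no set object built per column); return values proved
-- equal on non-ragged grids.


-- ===== PORT A =====
-- column_values = {row[col_idx] for row in grid}; row[col_idx] is total under Pre_ (every row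
-- has ≥ cols entries), ported as getD c 0 (the default is never reached inside Pre_)
def pvAColSet (grid : List (List Int)) (c : Nat) : PySem.Set Int :=
  PySem.Set.ofList (grid.map (fun row => row.getD c 0))

-- the 'for col_idx in range(cols)' loop
def pvAGo (grid : List (List Int)) : List Nat → Option (Int × Int)
  | [] => none
  | c :: cs =>
      let s := pvAColSet grid c
      if s.length ≠ 1 then pvAGo grid cs
      else
        let v := s.headD 0      -- next(iter(column_values)); the set is a singleton
        if v ≠ 0 then some ((c : Int), v) else pvAGo grid cs

def find_uniform_separator_column_py (grid : List (List Int)) : Option (Int × Int) :=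
  match grid with
  | [] => none
  | r0 :: _ => if r0.length = 0 then none else pvAGo grid (List.range r0.length)

-- ===== PORT B =====
-- inner 'for c in range(cols): if row[c] != candidate[c]: alive[c] = False'
def pvBStep (cand : List Int) (alive : List Bool) (row : List Int) : List Bool :=
  (List.range cand.length).map
    (fun c => alive.getD c true && decide (row.getD c 0 = cand.getD c 0))

-- final 'for c in range(cols): if alive[c] and candidate[c] != 0: return …'
def pvBScan (cand : List Int) (alive : List Bool) : List Nat → Option (Int × Int)
  | [] => none
  | c :: cs =>
      if alive.getD c true && decide (cand.getD c 0 ≠ 0) then some ((c : Int), cand.getD c 0)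
      else pvBScan cand alive cs

def find_uniform_separator_column_py_alt (grid : List (List Int)) : Option (Int × Int) :=
  match grid with
  | [] => none
  | r0 :: rest =>
      if r0.length = 0 then none
      else
        let alive := rest.foldl (pvBStep r0) (List.replicate r0.length true)
        pvBScan r0 alive (List.range r0.length)

-- ===== PRECONDITION & SPEC =====
-- Pre_ excludes ragged grids (a row shorter than the first row): there A's row[col_idx] can
-- raise IndexError, or A returns from an early column while B's row-major pass raises.
def Pre_find_uniform_separator_column_py (grid : List (List Int)) : Prop :=
  ∀ row ∈ grid, (grid.headD []).length ≤ row.length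
instance (grid : List (List Int)) : Decidable (Pre_find_uniform_separator_column_py grid) := by unfold Pre_find_uniform_separator_column_py; infer_instance
def pvWitness_find_uniform_separator_column_py : List (List Int) := [[0, 3], [1, 3]]

def Spec_find_uniform_separator_column_py (grid : List (List Int)) (out : Option (Int × Int)) : Prop := out = find_uniform_separator_column_py_alt grid
instance (grid : List (List Int)) (out : Option (Int × Int)) : Decidable (Spec_find_uniform_separator_column_py grid out) := by unfold Spec_find_uniform_separator_column_py; infer_instance

-- ===== CLAIM (what is proved, stated in full; the proofs are below) =====
def Claim_equal_find_uniform_separator_column_py : Prop := ∀ (grid : List (List Int)), Dom_find_uniform_separator_column_py grid → Pre_find_uniform_separator_column_py grid → Spec_find_uniform_separator_column_py grid (find_uniform_separator_column_py grid)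

-- ===== LEMMAS AND PROOFS =====

lemma pvAdd_ne_nil (acc : PySem.Set Int) (x : Int) : PySem.Set.add acc x ≠ [] := by
  unfold PySem.Set.add
  split_ifs with hh
  · intro he; rw [he] at hh; simp [PySem.Set.contains] at hh
  · simp

lemma pvHeadD_add (acc : PySem.Set Int) (x : Int) (d : Int) (h : acc ≠ []) :
    (PySem.Set.add acc x).headD d = acc.headD d := by
  unfold PySem.Set.add
  split_ifs with hh
  · rfl
  · cases acc with
    | nil => exact absurd rfl h
    | cons a l => rfl

-- Set.add only ever appends, so the first inserted element stays in front
lemma pvHeadD_foldl_add (l : List Int) (acc : PySem.Set Int) (d : Int) (h : acc ≠ []) :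
    (l.foldl PySem.Set.add acc).headD d = acc.headD d := by
  induction l generalizing acc with
  | nil => rfl
  | cons x l ih =>
      simp only [List.foldl_cons]
      rw [ih _ (pvAdd_ne_nil acc x), pvHeadD_add _ _ _ h]

lemma pvLe_len_foldl_add (l : List Int) (acc : PySem.Set Int) :
    acc.length ≤ (l.foldl PySem.Set.add acc).length := by
  induction l generalizing acc with
  | nil => simp
  | cons x l ih =>
      simp only [List.foldl_cons]
      refine le_trans ?_ (ih (PySem.Set.add acc x))
      unfold PySem.Set.add
      split_ifs <;> simp

-- the set stops growing exactly when every later element is already present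
lemma pvLen_foldl_add_eq_iff (l : List Int) (acc : PySem.Set Int) :
    (l.foldl PySem.Set.add acc).length = acc.length ↔ ∀ x ∈ l, x ∈ acc := by
  induction l generalizing acc with
  | nil => simp
  | cons x l ih =>
      simp only [List.foldl_cons, List.mem_cons]
      by_cases hx : x ∈ acc
      · have : PySem.Set.add acc x = acc := by
          unfold PySem.Set.add
          simp [PySem.Set.contains, hx]
        rw [this, ih]
        constructor
        · intro h y hy; rcases hy with rfl | hy; exact hx; exact h y hy
        · intro h y hy; exact h y (Or.inr hy)
      · have hlen : (PySem.Set.add acc x).length = acc.length + 1 := by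
          unfold PySem.Set.add
          simp [PySem.Set.contains, hx]
        constructor
        · intro h
          exfalso
          have := pvLe_len_foldl_add l (PySem.Set.add acc x)
          omega
        · intro h; exact absurd hx (by simpa using h x (Or.inl rfl))

-- A's next(iter(s)) on column c is the first row's value
lemma pvAColSet_headD (r0 : List Int) (rest : List (List Int)) (c : Nat) :
    (pvAColSet (r0 :: rest) c).headD 0 = r0.getD c 0 := by
  unfold pvAColSet
  rw [PySem.Set.ofList_eq_foldl]
  simp only [List.map_cons, List.foldl_cons]
  exact pvHeadD_foldl_add _ _ _ (by simp [PySem.Set.add, PySem.Set.contains])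

-- A's singleton-set test on column c is 'every later row matches the first row there'
lemma pvAColSet_len_one_iff (r0 : List Int) (rest : List (List Int)) (c : Nat) :
    (pvAColSet (r0 :: rest) c).length = 1 ↔ ∀ row ∈ rest, row.getD c 0 = r0.getD c 0 := by
  unfold pvAColSet
  rw [PySem.Set.ofList_eq_foldl]
  simp only [List.map_cons, List.foldl_cons]
  have hadd : PySem.Set.add ([] : PySem.Set Int) (r0.getD c 0) = [r0.getD c 0] := by
    simp [PySem.Set.add, PySem.Set.contains]
  rw [hadd]
  rw [show (1 : Nat) = ([r0.getD c 0] : List Int).length by simp]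
  rw [pvLen_foldl_add_eq_iff]
  simp

-- B's mask after the fold records exactly that condition, columnwise
lemma pvMask_getD_gen (r0 : List Int) (rest : List (List Int)) (m : List Bool) (c : Nat)
    (hc : c < r0.length) :
    (rest.foldl (pvBStep r0) m).getD c true
      = (m.getD c true && decide (∀ row ∈ rest, row.getD c 0 = r0.getD c 0)) := by
  induction rest generalizing m with
  | nil => simp
  | cons row rest ih =>
      simp only [List.foldl_cons]
      rw [ih]
      have : (pvBStep r0 m row).getD c true
          = (m.getD c true && decide (row.getD c 0 = r0.getD c 0)) := by
        unfold pvBStep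
        rw [PySem.List.getD_map_range]
        simp [hc]
      rw [this]
      simp only [List.forall_mem_cons, Bool.and_assoc, Bool.decide_and]

-- the two column scans agree column by column
lemma pvScan_eq (r0 : List Int) (rest : List (List Int)) (cs : List Nat)
    (h : ∀ c ∈ cs, c < r0.length) :
    pvAGo (r0 :: rest) cs
      = pvBScan r0 (rest.foldl (pvBStep r0) (List.replicate r0.length true)) cs := by
  induction cs with
  | nil => rfl
  | cons c cs ih =>
      have hc : c < r0.length := h c (List.mem_cons_self)
      have ihs := ih (fun x hx => h x (List.mem_cons_of_mem _ hx))
      have hmask : (rest.foldl (pvBStep r0) (List.replicate r0.length true)).getD c true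
          = decide (∀ row ∈ rest, row.getD c 0 = r0.getD c 0) := by
        rw [pvMask_getD_gen r0 rest _ c hc]
        simp
      simp only [pvAGo, pvBScan, hmask]
      by_cases hall : ∀ row ∈ rest, row.getD c 0 = r0.getD c 0
      · have hlen : (pvAColSet (r0 :: rest) c).length = 1 :=
          (pvAColSet_len_one_iff r0 rest c).mpr hall
        rw [if_neg (by simp [hlen]), pvAColSet_headD, decide_eq_true hall, Bool.true_and]
        by_cases hv : r0.getD c 0 = 0
        · rw [if_neg (not_not_intro hv), if_neg (by simpa using hv), ihs]
        · rw [if_pos hv, if_pos (by simpa using hv)]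
      · have hlen : (pvAColSet (r0 :: rest) c).length ≠ 1 :=
          fun hl => hall ((pvAColSet_len_one_iff r0 rest c).mp hl)
        rw [if_pos hlen, decide_eq_false hall, Bool.false_and,
          if_neg (by simp), ihs]

-- ===== VERDICT (by name: the statement is the Claim_ definition above) =====
theorem find_uniform_separator_column_py_spec : Claim_equal_find_uniform_separator_column_py := by
  intro grid _ _
  unfold Spec_find_uniform_separator_column_py
  match grid with
  | [] => rfl
  | r0 :: rest =>
      simp only [find_uniform_separator_column_py, find_uniform_separator_column_py_alt]
      by_cases h0 : r0.length = 0
      · simp [h0]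
      · simp only [h0, if_false]
        exact pvScan_eq r0 rest (List.range r0.length) (by simp)
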